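-- pv_equiv track=rewrite | github.com/Hecomer/2s | 2sem/dz1/1.8.py | make_shades
-- ===== SOURCE A (Python) =====
-- def make_shades(alley, k):
--     b = list(map(lambda x: False, range(len(alley))))
--     for i in range(len(alley)):
--         if alley[i] > 0:
--             for j in range(int(alley[i]) * k + 1):
--                 if (len(b) - 1) >= (i + j):
--                     b[i + j] = True
--     return b
-- ===== SOURCE B (Python) =====
-- def make_shades(alley, k):
--     # Single left-to-right sweep keeping the furthest index reached so far.
--     reach = -1
--     out = []
--     for i, x in enumerate(alley):
--         if x > 0:
--             reach = max(reach, i + x * k)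
--         out.append(reach >= i)
--     return out
-- ===== Notes on version B (the rewrite author's own statement) =====
-- stated objective: faster
-- what changed: B replaces A's nested loops (which re-mark every covered position for each tree) by a single left-to-right sweep that keeps the furthest reached index and emits reach >= i per position.
import Mathlib
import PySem

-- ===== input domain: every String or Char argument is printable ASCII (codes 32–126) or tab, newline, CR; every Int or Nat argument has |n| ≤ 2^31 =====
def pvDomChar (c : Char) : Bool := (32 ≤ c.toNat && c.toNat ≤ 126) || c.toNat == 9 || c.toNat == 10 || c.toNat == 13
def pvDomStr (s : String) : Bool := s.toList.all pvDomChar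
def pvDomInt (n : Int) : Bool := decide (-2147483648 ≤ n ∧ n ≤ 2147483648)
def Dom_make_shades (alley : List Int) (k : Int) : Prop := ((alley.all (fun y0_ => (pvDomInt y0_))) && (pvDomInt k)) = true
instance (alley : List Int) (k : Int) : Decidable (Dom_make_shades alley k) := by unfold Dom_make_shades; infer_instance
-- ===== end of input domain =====

-- B replaces A's nested marking loops by a single left-to-right sweep that keeps the
-- furthest reached index; objective: faster (one pass instead of re-marking ranges).

-- ===== PORT A =====
-- literal transliteration of A; b[i+j] = True becomes List.set at (i+j).toNat (i, j ≥ 0 there)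
def make_shades (alley : List Int) (k : Int) : List Bool :=
  let b := (PySem.List.pyRange 0 (alley.length : Int) 1).map (fun _ => false)
  (PySem.List.pyRange 0 (alley.length : Int) 1).foldl (fun b i =>
    if 0 < PySem.List.pyGetD alley i 0 then
      (PySem.List.pyRange 0 (PySem.List.pyGetD alley i 0 * k + 1) 1).foldl (fun b j =>
        if ((b.length : Int) - 1) ≥ i + j then b.set (i + j).toNat true else b) b
    else b) b

-- ===== PORT B =====
-- literal transliteration of Source B's sweep (fold over enumerate, state = (reach, out))
def make_shades_alt (alley : List Int) (k : Int) : List Bool :=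
  ((PySem.List.enumerate alley 0).foldl
    (fun st p =>
      let reach := if 0 < p.2 then max st.1 (p.1 + p.2 * k) else st.1
      (reach, st.2 ++ [decide (reach ≥ p.1)]))
    ((-1 : Int), ([] : List Bool))).2

-- ===== PRECONDITION & SPEC =====
def Spec_make_shades (alley : List Int) (k : Int) (out : List Bool) : Prop := out = make_shades_alt alley k
instance (alley : List Int) (k : Int) (out : List Bool) : Decidable (Spec_make_shades alley k out) := by unfold Spec_make_shades; infer_instance

-- ===== CLAIM (what is proved, stated in full; the proofs are below) =====
def Claim_equal_make_shades : Prop := ∀ (alley : List Int) (k : Int), Dom_make_shades alley k → Spec_make_shades alley k (make_shades alley k)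

-- ===== LEMMAS AND PROOFS =====

-- position p is shaded iff some earlier-or-equal index i holds a tree reaching p
def shadeAt (alley : List Int) (k : Int) (p : Nat) : Bool :=
  (List.range (p + 1)).any (fun i =>
    decide (0 < alley.getD i 0 ∧ (p : Int) ≤ (i : Int) + alley.getD i 0 * k))

-- B's sweep as structural recursion (s = current index, r = current reach)
def goB (k : Int) : List Int → Int → Int → List Bool
  | [], _, _ => []
  | x :: xs, s, r =>
    let r' := if 0 < x then max r (s + x * k) else r
    decide (r' ≥ s) :: goB k xs (s + 1) r'

lemma foldB_eq (k : Int) (xs : List Int) (s r : Int) (acc : List Bool) :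
    ((PySem.List.enumerate xs s).foldl
      (fun st p =>
        let reach := if 0 < p.2 then max st.1 (p.1 + p.2 * k) else st.1
        (reach, st.2 ++ [decide (reach ≥ p.1)])) (r, acc)).2 = acc ++ goB k xs s r := by
  induction xs generalizing s r acc with
  | nil => simp [PySem.List.enumerate_nil, goB]
  | cons x xs ih =>
      simp only [PySem.List.enumerate_cons, List.foldl_cons, goB]
      rw [ih]
      simp

lemma goB_length (k : Int) (xs : List Int) (s r : Int) :
    (goB k xs s r).length = xs.length := by
  induction xs generalizing s r with
  | nil => rfl
  | cons x xs ih => simp [goB, ih]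

lemma goB_getElem (k : Int) (xs : List Int) (s r : Int) (p : Nat) (hp : p < xs.length) :
    (goB k xs s r)[p]'(by rw [goB_length]; exact hp)
      = (decide (s + (p : Int) ≤ r) ||
         (List.range (p + 1)).any (fun i =>
           decide (0 < xs.getD i 0 ∧ (p : Int) ≤ (i : Int) + xs.getD i 0 * k))) := by
  induction xs generalizing s r p with
  | nil => simp at hp
  | cons x xs ih =>
      cases p with
      | zero =>
          simp only [goB, List.getElem_cons_zero, List.range_one, List.any_cons, List.any_nil,
            List.getD_cons_zero, Nat.cast_zero, add_zero, zero_add, Bool.or_false]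
          by_cases hx : 0 < x <;> simp [hx, ge_iff_le]
      | succ p =>
          simp only [goB, List.getElem_cons_succ]
          rw [ih _ _ _ (by simpa using hp)]
          rw [List.range_succ_eq_map (n := p + 1)]
          simp only [List.any_cons, List.any_map, List.getD_cons_zero, Nat.cast_zero]
          have hany : (List.range (p + 1)).any
              ((fun i => decide (0 < (x :: xs).getD i 0 ∧ (((p + 1 : Nat)) : Int) ≤ (i : Int) + (x :: xs).getD i 0 * k)) ∘ Nat.succ)
              = (List.range (p + 1)).any (fun i =>
                decide (0 < xs.getD i 0 ∧ (p : Int) ≤ (i : Int) + xs.getD i 0 * k)) := by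
            apply PySem.List.any_congr_mem
            intro i _
            simp only [Function.comp, List.getD_cons_succ, Nat.cast_succ, decide_eq_decide]
            constructor <;> rintro ⟨h1, h2⟩ <;> exact ⟨h1, by omega⟩
          rw [hany]
          have h1 : decide (s + 1 + (p : Int) ≤ if 0 < x then max r (s + x * k) else r)
              = (decide (s + (((p + 1 : Nat)) : Int) ≤ r) || decide (0 < x ∧ (((p + 1 : Nat)) : Int) ≤ 0 + x * k)) := by
            by_cases hx : 0 < x <;> push_cast <;>
              simp [hx,
                show (s + 1 + (p : Int) ≤ r) ↔ s + ((p : Int) + 1) ≤ r from by omega,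
                show (s + 1 + (p : Int) ≤ s + x * k) ↔ (p : Int) + 1 ≤ 0 + x * k from by omega]
          rw [h1, Bool.or_assoc]

lemma alt_eq_goB (alley : List Int) (k : Int) :
    make_shades_alt alley k = goB k alley 0 (-1) := by
  unfold make_shades_alt
  rw [foldB_eq]
  simp

lemma alt_length (alley : List Int) (k : Int) :
    (make_shades_alt alley k).length = alley.length := by
  rw [alt_eq_goB, goB_length]

lemma alt_getElem (alley : List Int) (k : Int) (p : Nat) (hp : p < alley.length) :
    (make_shades_alt alley k)[p]'(by rw [alt_length]; exact hp) = shadeAt alley k p := by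
  simp only [alt_eq_goB]
  rw [goB_getElem k alley 0 (-1) p hp]
  simp only [shadeAt]
  simp
  intro h
  exact absurd h (by omega)

-- inner loop of A: marking positions i+j for j ∈ L
lemma innerA (L : List Int) (b : List Bool) (i : Int) (hi : 0 ≤ i) (hL : ∀ j ∈ L, 0 ≤ j) :
    (L.foldl (fun b j => if ((b.length : Int) - 1) ≥ i + j then b.set (i + j).toNat true else b) b).length = b.length ∧
    ∀ p : Nat, p < b.length →
      (L.foldl (fun b j => if ((b.length : Int) - 1) ≥ i + j then b.set (i + j).toNat true else b) b).getD p false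
        = (b.getD p false || L.any (fun j => decide (i + j = (p : Int)))) := by
  induction L generalizing b with
  | nil => simp
  | cons j L ih =>
      have hj : 0 ≤ j := hL j (by simp)
      have hL' : ∀ j ∈ L, 0 ≤ j := fun j hj => hL j (by simp [hj])
      simp only [List.foldl_cons]
      by_cases hg : ((b.length : Int) - 1) ≥ i + j
      · rw [if_pos hg]
        obtain ⟨hlen, hget⟩ := ih (b.set (i + j).toNat true) hL'
        refine ⟨by simpa using hlen, ?_⟩
        intro p hp
        rw [hget p (by simpa using hp)]
        have hset : (b.set (i + j).toNat true).getD p false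
            = (b.getD p false || decide (i + j = (p : Int))) := by
          rw [List.getD_eq_getElem _ _ (by simpa using hp), List.getD_eq_getElem _ _ hp,
            List.getElem_set]
          by_cases he : i + j = (p : Int)
          · have ht : (i + j).toNat = p := by omega
            simp [he]
          · have ht : (i + j).toNat ≠ p := by omega
            simp [ht, he]
        rw [hset, List.any_cons, Bool.or_assoc]
      · rw [if_neg hg]
        obtain ⟨hlen, hget⟩ := ih b hL'
        refine ⟨hlen, ?_⟩
        intro p hp
        rw [hget p hp]
        have : decide (i + j = (p : Int)) = false := by
          simp only [decide_eq_false_iff_not]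
          omega
        simp [this]

-- outer loop of A
lemma outerA (alley : List Int) (k : Int) (I : List Int) (b : List Bool) (hI : ∀ i ∈ I, 0 ≤ i) :
    (I.foldl (fun b i =>
      if 0 < PySem.List.pyGetD alley i 0 then
        (PySem.List.pyRange 0 (PySem.List.pyGetD alley i 0 * k + 1) 1).foldl (fun b j =>
          if ((b.length : Int) - 1) ≥ i + j then b.set (i + j).toNat true else b) b
      else b) b).length = b.length ∧
    ∀ p : Nat, p < b.length →
      (I.foldl (fun b i =>
        if 0 < PySem.List.pyGetD alley i 0 then
          (PySem.List.pyRange 0 (PySem.List.pyGetD alley i 0 * k + 1) 1).foldl (fun b j =>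
            if ((b.length : Int) - 1) ≥ i + j then b.set (i + j).toNat true else b) b
        else b) b).getD p false
        = (b.getD p false || I.any (fun i =>
            decide (0 < PySem.List.pyGetD alley i 0) &&
            (PySem.List.pyRange 0 (PySem.List.pyGetD alley i 0 * k + 1) 1).any
              (fun j => decide (i + j = (p : Int))))) := by
  induction I generalizing b with
  | nil => simp
  | cons i I ih =>
      have hi : 0 ≤ i := hI i (by simp)
      have hI' : ∀ i ∈ I, 0 ≤ i := fun i h => hI i (by simp [h])
      simp only [List.foldl_cons]
      by_cases hpos : 0 < PySem.List.pyGetD alley i 0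
      · rw [if_pos hpos]
        obtain ⟨hlen1, hget1⟩ := innerA
          (PySem.List.pyRange 0 (PySem.List.pyGetD alley i 0 * k + 1) 1) b i hi
          (fun j hj => (PySem.List.mem_pyRange_one.mp hj).1)
        obtain ⟨hlen2, hget2⟩ := ih _ hI'
        refine ⟨hlen2.trans hlen1, ?_⟩
        intro p hp
        rw [hget2 p (by rw [hlen1]; exact hp), hget1 p hp]
        simp [hpos, Bool.or_assoc]
      · rw [if_neg hpos]
        obtain ⟨hlen2, hget2⟩ := ih b hI'
        refine ⟨hlen2, ?_⟩
        intro p hp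
        rw [hget2 p hp]
        simp [hpos]

lemma bridge (alley : List Int) (k : Int) (p : Nat) (hp : p < alley.length) :
    (PySem.List.pyRange 0 (alley.length : Int) 1).any (fun i =>
      decide (0 < PySem.List.pyGetD alley i 0) &&
      (PySem.List.pyRange 0 (PySem.List.pyGetD alley i 0 * k + 1) 1).any
        (fun j => decide (i + j = (p : Int)))) = shadeAt alley k p := by
  simp only [shadeAt]
  apply Bool.eq_iff_iff.mpr
  simp only [List.any_eq_true, Bool.and_eq_true, decide_eq_true_eq, List.mem_range,
    PySem.List.mem_pyRange_one]
  constructor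
  · rintro ⟨i, ⟨h0i, hin⟩, hpos, j, ⟨h0j, hjlt⟩, hij⟩
    rw [PySem.List.pyGetD_of_nonneg _ _ h0i] at hpos hjlt
    have hti : ((i.toNat : Nat) : Int) = i := Int.toNat_of_nonneg h0i
    refine ⟨i.toNat, by omega, hpos, by rw [hti]; omega⟩
  · rintro ⟨i, hilt, hpos, hple⟩
    refine ⟨(i : Int), ⟨by omega, by omega⟩, ?_⟩
    rw [PySem.List.pyGetD_of_nonneg _ _ (by omega : (0 : Int) ≤ (i : Int))]
    simp only [Int.toNat_natCast]
    exact ⟨hpos, (p : Int) - (i : Int), ⟨by omega, by omega⟩, by omega⟩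

lemma a_length (alley : List Int) (k : Int) :
    (make_shades alley k).length = alley.length := by
  unfold make_shades
  have h := (outerA alley k (PySem.List.pyRange 0 (alley.length : Int) 1)
    ((PySem.List.pyRange 0 (alley.length : Int) 1).map (fun _ => false))
    (fun i hi => (PySem.List.mem_pyRange_one.mp hi).1)).1
  simpa using h

lemma b0_getD (alley : List Int) (q : Nat) :
    ((PySem.List.pyRange 0 (alley.length : Int) 1).map (fun _ => (false : Bool))).getD q false
      = false := by
  rcases lt_or_ge q (((PySem.List.pyRange 0 (alley.length : Int) 1).map
      (fun _ => (false : Bool))).length) with h | h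
  · rw [List.getD_eq_getElem _ _ h]
    simp
  · exact List.getD_eq_default _ _ h

lemma a_getD (alley : List Int) (k : Int) (p : Nat) (hp : p < alley.length) :
    (make_shades alley k).getD p false = shadeAt alley k p := by
  unfold make_shades
  obtain ⟨hlen, hget⟩ := outerA alley k (PySem.List.pyRange 0 (alley.length : Int) 1)
    ((PySem.List.pyRange 0 (alley.length : Int) 1).map (fun _ => false))
    (fun i hi => (PySem.List.mem_pyRange_one.mp hi).1)
  rw [hget p (by simp [PySem.List.length_pyRange_one]; omega)]
  rw [b0_getD alley p, Bool.false_or, bridge alley k p hp]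

-- ===== VERDICT (by name: the statement is the Claim_ definition above) =====
theorem make_shades_spec : Claim_equal_make_shades := by
  intro alley k _
  unfold Spec_make_shades
  apply List.ext_getElem
  · rw [a_length, alt_length]
  · intro p h1 h2
    have hpA : p < alley.length := by rwa [a_length] at h1
    have hA := a_getD alley k p hpA
    rw [List.getD_eq_getElem _ _ h1] at hA
    rw [hA, alt_getElem alley k p hpA]
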